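-- pv_equiv track=rewrite | github.com/Raf-RM/Exercicios | Exercicios-Simples-Python/algoritmo-macaco-infinito.py | comparaFrase
-- ===== SOURCE A (Python) =====
-- def comparaFrase(frase_original, list_frase_gerada, n):
--     list_frase_orig = [letra for palavra in frase_original for letra in palavra]
--     compara = True
--     cont_iguais = 0
--     for i in range(n):
--         if list_frase_gerada[i] == list_frase_orig[i]:
--             cont_iguais += 1
--         else:
--             compara = False
--     return compara, cont_iguais
-- ===== SOURCE B (Python) =====
-- def comparaFrase(frase_original, list_frase_gerada, n):
--     cont_iguais = 0
--     consumidos = 0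
--     for palavra in frase_original:
--         for letra in palavra:
--             if consumidos >= n:
--                 return cont_iguais >= n, cont_iguais
--             if list_frase_gerada[consumidos] == letra:
--                 cont_iguais += 1
--             consumidos += 1
--     return cont_iguais >= n, cont_iguais
-- ===== Notes on version B (the rewrite author's own statement) =====
-- stated objective: alternative
-- what changed: B never builds the flattened letter list: it walks the original phrase word by word with a consumed-letters cursor into the generated list, returning early as soon as n letters have been checked, and derives the boolean as cont_iguais >= n instead of maintaining a separate flag.
import Mathlib
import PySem

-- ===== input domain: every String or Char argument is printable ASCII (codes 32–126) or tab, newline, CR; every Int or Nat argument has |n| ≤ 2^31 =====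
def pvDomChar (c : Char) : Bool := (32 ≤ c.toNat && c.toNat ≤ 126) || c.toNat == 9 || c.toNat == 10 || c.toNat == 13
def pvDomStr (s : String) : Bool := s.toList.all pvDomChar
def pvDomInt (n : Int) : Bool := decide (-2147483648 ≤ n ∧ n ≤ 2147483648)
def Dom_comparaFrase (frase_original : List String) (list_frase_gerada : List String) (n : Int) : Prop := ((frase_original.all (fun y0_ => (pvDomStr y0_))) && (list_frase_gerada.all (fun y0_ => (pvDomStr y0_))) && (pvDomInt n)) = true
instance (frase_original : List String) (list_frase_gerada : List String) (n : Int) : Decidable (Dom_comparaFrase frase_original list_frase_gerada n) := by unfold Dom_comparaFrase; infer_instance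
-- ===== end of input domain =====

-- B avoids A's flatten pass entirely: it walks the original phrase word by word with a
-- consumed-letters cursor, returns early once n letters are checked, and derives the
-- boolean as cont_iguais >= n instead of maintaining a flag (alternative decomposition).

-- ===== PORT A =====
-- loop body of A's 'for i in range(n)': state = (compara, cont_iguais); none = IndexError
def pvStepA (lg orig : List String) (acc : Option (Bool × Int)) (i : Int) : Option (Bool × Int) :=
  match acc with
  | none => none
  | some (compara, cont) =>
    match PySem.List.pyGet? lg i, PySem.List.pyGet? orig i with
    | some a, some b => some (if a == b then (compara, cont + 1) else (false, cont))
    | _, _ => none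

def comparaFrase (frase_original : List String) (list_frase_gerada : List String) (n : Int) : Bool × Int :=
  let list_frase_orig := frase_original.flatMap (fun palavra => palavra.toList.map (fun letra => String.ofList [letra]))
  let res := (PySem.List.pyRange 0 n 1).foldl (pvStepA list_frase_gerada list_frase_orig) (some (true, (0 : Int)))
  res.getD (true, 0)

-- ===== PORT B =====
-- inner 'for letra in palavra' loop; Sum.inl = the early 'return', Sum.inr = fall through
-- with the updated (cont_iguais, consumidos); none = IndexError on list_frase_gerada
def pvGoChars (g : List String) (n : Int) : List Char → Int → Int → Option (Sum (Bool × Int) (Int × Int))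
  | [], cont, cons => some (Sum.inr (cont, cons))
  | l :: ls, cont, cons =>
    if cons ≥ n then some (Sum.inl (decide (cont ≥ n), cont))
    else
      match PySem.List.pyGet? g cons with
      | none => none
      | some a => pvGoChars g n ls (if a == String.ofList [l] then cont + 1 else cont) (cons + 1)

-- outer 'for palavra in frase_original' loop
def pvGoWords (g : List String) (n : Int) : List String → Int → Int → Option (Bool × Int)
  | [], cont, _ => some (decide (cont ≥ n), cont)
  | w :: ws, cont, cons =>
    match pvGoChars g n w.toList cont cons with
    | none => none
    | some (Sum.inl r) => some r
    | some (Sum.inr (cont', cons')) => pvGoWords g n ws cont' cons'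

def comparaFrase_alt (frase_original : List String) (list_frase_gerada : List String) (n : Int) : Bool × Int :=
  (pvGoWords list_frase_gerada n frase_original 0 0).getD (true, 0)

-- ===== PRECONDITION & SPEC =====
-- Pre_ excludes exactly the inputs where A raises IndexError: n larger than either
-- the generated list or the flattened original phrase.
def Pre_comparaFrase (frase_original : List String) (list_frase_gerada : List String) (n : Int) : Prop :=
  n ≤ list_frase_gerada.length ∧ n ≤ (frase_original.flatMap String.toList).length
instance (frase_original : List String) (list_frase_gerada : List String) (n : Int) : Decidable (Pre_comparaFrase frase_original list_frase_gerada n) := by unfold Pre_comparaFrase; infer_instance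

def pvWitness_comparaFrase : List String × List String × Int := (["ab", "c"], ["a", "x", "c"], 3)

def Spec_comparaFrase (frase_original : List String) (list_frase_gerada : List String) (n : Int) (out : Bool × Int) : Prop := out = comparaFrase_alt frase_original list_frase_gerada n
instance (frase_original : List String) (list_frase_gerada : List String) (n : Int) (out : Bool × Int) : Decidable (Spec_comparaFrase frase_original list_frase_gerada n out) := by unfold Spec_comparaFrase; infer_instance

-- ===== CLAIM (what is proved, stated in full; the proofs are below) =====
def Claim_equal_comparaFrase : Prop := ∀ (frase_original : List String) (list_frase_gerada : List String) (n : Int), Dom_comparaFrase frase_original list_frase_gerada n → Pre_comparaFrase frase_original list_frase_gerada n → Spec_comparaFrase frase_original list_frase_gerada n (comparaFrase frase_original list_frase_gerada n)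

-- ===== LEMMAS AND PROOFS =====

-- position-j match test between the generated list and the flattened original letters
def pvP (g : List String) (O : List Char) (j : Nat) : Bool :=
  (g.getD j "") == String.ofList [O.getD j ' ']

-- number of matching positions in [s, t)
def pvC (g : List String) (O : List Char) (s t : Nat) : Nat :=
  (List.range' s (t - s)).countP (pvP g O)

theorem pvC_le (g : List String) (O : List Char) (s t : Nat) : pvC g O s t ≤ t - s := by
  calc pvC g O s t ≤ (List.range' s (t - s)).length := List.countP_le_length
    _ = t - s := by simp

theorem pvC_append (g : List String) (O : List Char) (s u t : Nat) (h1 : s ≤ u) (h2 : u ≤ t) :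
    pvC g O s t = pvC g O s u + pvC g O u t := by
  unfold pvC
  rw [show t - s = (u - s) + (t - u) by omega, ← List.range'_append_1,
    show s + (u - s) = u by omega, List.countP_append]

theorem pvC_succ (g : List String) (O : List Char) (s : Nat) :
    pvC g O s (s + 1) = if pvP g O s then 1 else 0 := by
  unfold pvC
  simp [List.countP_cons, show s + 1 - s = 1 by omega]

-- A's loop computes (no mismatch yet, pvC 0 m)
theorem pvLoopA (lg : List String) (O : List Char) (m : Nat) (hg : m ≤ lg.length) (ho : m ≤ O.length) :
    (PySem.List.pyRange 0 (m : Int) 1).foldl (pvStepA lg (O.map (fun c => String.ofList [c]))) (some (true, (0 : Int)))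
      = some (decide ((pvC lg O 0 m : Int) = (m : Int)), (pvC lg O 0 m : Int)) := by
  induction m with
  | zero => simp [pvC, PySem.List.pyRange_one_eq_nil]
  | succ m ih =>
    have hg' : m < lg.length := by omega
    have ho' : m < O.length := by omega
    have hrange : PySem.List.pyRange 0 ((m + 1 : Nat) : Int) 1
        = PySem.List.pyRange 0 (m : Int) 1 ++ [(m : Int)] := by
      push_cast
      exact PySem.List.pyRange_one_succ_right (by positivity)
    rw [hrange, List.foldl_append, ih (by omega) (by omega)]
    have h1 : PySem.List.pyGet? lg (m : Int) = some lg[m] := by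
      simp [PySem.List.pyGet?_natCast, List.getElem?_eq_getElem hg']
    have h2 : PySem.List.pyGet? (O.map (fun c => String.ofList [c])) (m : Int)
        = some (String.ofList [O[m]]) := by
      simp [ho']
    have hstep : pvC lg O 0 (m + 1) = pvC lg O 0 m + (if pvP lg O m then 1 else 0) := by
      rw [pvC_append lg O 0 m (m + 1) (by omega) (by omega), pvC_succ]
    have hP : pvP lg O m = (lg[m] == String.ofList [O[m]]) := by
      unfold pvP
      rw [List.getD_eq_getElem lg "" hg', List.getD_eq_getElem O ' ' ho']
    have hle := pvC_le lg O 0 m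
    simp only [List.foldl_cons, List.foldl_nil, pvStepA, h1, h2]
    rw [hstep, hP]
    by_cases h : lg[m] == String.ofList [O[m]]
    · simp only [h, if_true, Option.some.injEq, Prod.mk.injEq]
      refine ⟨?_, by push_cast; ring⟩
      rw [decide_eq_decide.mpr (show ((pvC lg O 0 m : Int) = (m : Int)) ↔ ((↑(pvC lg O 0 m + 1) : Int) = (↑(m + 1) : Int)) from by push_cast; omega)]
    · simp only [h, if_false, Bool.false_eq_true, Option.some.injEq, Prod.mk.injEq]
      refine ⟨?_, by push_cast; ring⟩
      have hlei : (pvC lg O 0 m : Int) ≤ (m : Int) := by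
        have := pvC_le lg O 0 m; omega
      symm
      rw [decide_eq_false_iff_not]
      push_cast
      omega

-- B's inner loop, under Pre_, in terms of pvC
theorem pvGoChars_spec (g : List String) (O : List Char) (n : Int) (n' : Nat) (hn : n = (n' : Int))
    (hg : n' ≤ g.length)
    (letras rest : List Char) (cont : Int) (s : Nat)
    (hdrop : O.drop s = letras ++ rest) (hs : s ≤ n') :
    pvGoChars g n letras cont (s : Int) =
      if s + letras.length ≤ n'
      then some (Sum.inr (cont + (pvC g O s (s + letras.length) : Int), ((s + letras.length : Nat) : Int)))
      else some (Sum.inl (decide (cont + (pvC g O s n' : Int) ≥ n), cont + (pvC g O s n' : Int))) := by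
  induction letras generalizing cont s with
  | nil =>
    simp [pvGoChars, pvC]
    omega
  | cons l ls ih =>
    have hsO : s < O.length := by
      have := congrArg List.length hdrop
      simp at this
      omega
    rcases Nat.lt_or_ge s n' with hlt | hge
    · -- no early return this iteration
      have hcond : ¬ ((s : Int) ≥ n) := by rw [hn]; omega
      have hget : PySem.List.pyGet? g (s : Int) = some (g.getD s "") := by
        have hsg : s < g.length := by omega
        simp [PySem.List.pyGet?_natCast, List.getElem?_eq_getElem hsg]
      have hOl : O.getD s ' ' = l := by
        have : O.drop s = O[s] :: O.drop (s + 1) := List.drop_eq_getElem_cons hsO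
        rw [this] at hdrop
        have := (List.cons.injEq _ _ _ _).mp hdrop
        rw [List.getD_eq_getElem O ' ' hsO, this.1]
      have hdrop' : O.drop (s + 1) = ls ++ rest := by
        have : O.drop s = O[s] :: O.drop (s + 1) := List.drop_eq_getElem_cons hsO
        rw [this] at hdrop
        exact ((List.cons.injEq _ _ _ _).mp hdrop).2
      simp only [pvGoChars, hcond, if_false, hget]
      have hih := ih (if (g.getD s "") == String.ofList [l] then cont + 1 else cont) (s + 1) hdrop' (by omega)
      rw [show ((s : Int) + 1) = ((s + 1 : Nat) : Int) by push_cast; ring, hih]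
      have hPs : pvP g O s = ((g.getD s "") == String.ofList [l]) := by
        unfold pvP; rw [hOl]
      have hCstep : ∀ t, s + 1 ≤ t → (pvC g O s t : Int)
          = (if (g.getD s "") == String.ofList [l] then 1 else 0) + pvC g O (s + 1) t := by
        intro t ht
        rw [pvC_append g O s (s + 1) t (by omega) ht, pvC_succ, hPs]
        split <;> push_cast <;> ring
      by_cases hfit : s + (l :: ls).length ≤ n'
      · have hfit' : (s + 1) + ls.length ≤ n' := by simp at hfit; omega
        rw [if_pos hfit', if_pos hfit]
        have harith : s + 1 + ls.length = s + (l :: ls).length := by simp; omega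
        rw [harith]
        have hx := hCstep (s + (l :: ls).length) (by simp only [List.length_cons]; omega)
        refine congrArg _ (congrArg _ (Prod.ext ?_ rfl))
        rw [hx]
        split <;> ring
      · have hfit' : ¬ ((s + 1) + ls.length ≤ n') := by simp at hfit ⊢; omega
        rw [if_neg hfit', if_neg hfit]
        have hc : cont + (pvC g O s n' : Int)
            = (if (g.getD s "") == String.ofList [l] then cont + 1 else cont) + (pvC g O (s + 1) n' : Int) := by
          rw [hCstep n' (by omega)]
          split <;> ring
        rw [hc]
    · -- s = n': early return
      have hseq : s = n' := by omega
      have hcond : ((s : Int) ≥ n) := by rw [hn]; omega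
      simp only [pvGoChars, hcond, if_true]
      rw [if_neg (by simp; omega)]
      have : pvC g O s n' = 0 := by unfold pvC; rw [hseq]; simp
      rw [this]
      simp

-- B's outer loop, under Pre_
theorem pvGoWords_spec (g : List String) (O : List Char) (n : Int) (n' : Nat) (hn : n = (n' : Int))
    (hg : n' ≤ g.length) (hO : n' ≤ O.length)
    (words : List String) (cont : Int) (s : Nat)
    (hdrop : O.drop s = words.flatMap String.toList) (hs : s ≤ n') :
    pvGoWords g n words cont (s : Int)
      = some (decide (cont + (pvC g O s n' : Int) ≥ n), cont + (pvC g O s n' : Int)) := by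
  induction words generalizing cont s with
  | nil =>
    simp only [List.flatMap_nil] at hdrop
    have : O.length ≤ s := List.drop_eq_nil_iff.mp hdrop
    have hseq : s = n' := by omega
    have hc : pvC g O s n' = 0 := by unfold pvC; rw [hseq]; simp
    simp [pvGoWords, hc]
  | cons w ws ih =>
    have hdropw : O.drop s = w.toList ++ ws.flatMap String.toList := by simpa using hdrop
    rw [pvGoWords, pvGoChars_spec g O n n' hn hg w.toList (ws.flatMap String.toList) cont s hdropw hs]
    by_cases hfit : s + w.toList.length ≤ n'
    · rw [if_pos hfit]
      dsimp only
      have hdrop' : O.drop (s + w.toList.length) = ws.flatMap String.toList := by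
        rw [← List.drop_drop, hdropw]
        simp
      rw [ih (cont + (pvC g O s (s + w.toList.length) : Int)) (s + w.toList.length) hdrop' hfit]
      rw [pvC_append g O s (s + w.toList.length) n' (by omega) hfit]
      congr 2 <;> push_cast <;> ring
    · rw [if_neg hfit]

-- for n ≤ 0, B returns (true, 0) immediately
theorem pvGoWords_nonpos (g : List String) (n : Int) (hn : n ≤ 0) (words : List String) :
    pvGoWords g n words 0 0 = some (true, 0) := by
  induction words with
  | nil => simp [pvGoWords, hn]
  | cons w ws ih =>
    rw [pvGoWords]
    match hW : w.toList with
    | [] => rw [pvGoChars]; exact ih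
    | l :: ls =>
      rw [pvGoChars, if_pos (by omega : (0 : Int) ≥ n)]
      simp [hn]

-- the char list A flattens has the same elements as the flattened phrase, as strings
theorem pvOrig_eq (fo : List String) :
    fo.flatMap (fun w => w.toList.map (fun c => String.ofList [c]))
      = (fo.flatMap String.toList).map (fun c => String.ofList [c]) := by
  simp [List.map_flatMap]

-- ===== VERDICT (by name: the statement is the Claim_ definition above) =====
theorem comparaFrase_spec : Claim_equal_comparaFrase := by
  intro fo lg n _ hpre
  obtain ⟨h1, h2⟩ := hpre
  unfold Spec_comparaFrase comparaFrase comparaFrase_alt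
  dsimp only
  rw [pvOrig_eq fo]
  set O := fo.flatMap String.toList with hO
  by_cases hn : n ≤ 0
  · rw [PySem.List.pyRange_one_eq_nil hn, pvGoWords_nonpos lg n hn fo]
    simp
  · obtain ⟨m, hm⟩ : ∃ m : Nat, n = (m : Int) := ⟨n.toNat, by omega⟩
    subst hm
    have hg : m ≤ lg.length := by exact_mod_cast h1
    have ho : m ≤ O.length := by exact_mod_cast h2
    have hB := pvGoWords_spec lg O (m : Int) m rfl hg ho fo 0 0 (by simpa using hO) (by omega)
    rw [Nat.cast_zero] at hB
    rw [pvLoopA lg O m hg ho, hB]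
    simp only [Option.getD_some, zero_add]
    refine Prod.ext ?_ rfl
    have hle : pvC lg O 0 m ≤ m := by have := pvC_le lg O 0 m; omega
    show decide ((pvC lg O 0 m : Int) = (m : Int)) = decide ((pvC lg O 0 m : Int) ≥ (m : Int))
    rw [decide_eq_decide]
    omega
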